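-- pv_equiv track=rewrite | github.com/docToolchain/aoc-2022 | day15/python/ceedee666/day_15.py | possible_beacon_positions
-- ===== SOURCE A (Python) =====
-- def delta_row(sensor, distance, row):
--     return distance - abs(sensor[1] - row)
--
-- def possible_beacon_positions(sensors, beacons, distances, row):
--     ranges = []
--     for s, d in zip(sensors, distances):
--         d_row = delta_row(s, d, row)
--         if d_row > 0:
--             ranges.append((s[0] - d_row, s[0] + d_row))
--
--     ranges = sorted(ranges, key=lambda r: r[0])
--
--     possible_positions = []
--     max_col = ranges[0][1]
--
--     for i in range(len(ranges) - 1):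
--         max_col_prev = ranges[i][1]
--         min_col_next = ranges[i + 1][0]
--
--         if max_col_prev > max_col:
--             max_col = max_col_prev
--
--         if max_col < min_col_next:
--             for c in range(max_col + 1, min_col_next):
--                 possible_positions.append((c, row))
--
--     return possible_positions
-- ===== SOURCE B (Python) =====
-- def possible_beacon_positions(sensors, beacons, distances, row):
--     ranges = []
--     for (sx, sy), dist in zip(sensors, distances):
--         d = dist - abs(sy - row)
--         if d > 0:
--             ranges.append((sx - d, sx + d))
--     ranges.sort(key=lambda r: r[0])
--
--     # first pass: fold the sorted ranges into disjoint merged intervals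
--     cs, ce = ranges[0]
--     merged = []
--     for s, e in ranges[1:]:
--         if s <= ce:
--             if e > ce:
--                 ce = e
--         else:
--             merged.append((cs, ce))
--             cs, ce = s, e
--     merged.append((cs, ce))
--
--     # second pass: emit the gaps between consecutive merged intervals
--     return [(c, row)
--             for (_, e1), (s2, _) in zip(merged, merged[1:])
--             for c in range(e1 + 1, s2)]
-- ===== Notes on version B (the rewrite author's own statement) =====
-- stated objective: alternative
-- what changed: Replaces A's single pass with a running max that emits gaps inline by a two-phase decomposition: first fold the sorted ranges into an explicit list of disjoint merged intervals, then emit the gaps between consecutive merged intervals.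
import Mathlib
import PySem

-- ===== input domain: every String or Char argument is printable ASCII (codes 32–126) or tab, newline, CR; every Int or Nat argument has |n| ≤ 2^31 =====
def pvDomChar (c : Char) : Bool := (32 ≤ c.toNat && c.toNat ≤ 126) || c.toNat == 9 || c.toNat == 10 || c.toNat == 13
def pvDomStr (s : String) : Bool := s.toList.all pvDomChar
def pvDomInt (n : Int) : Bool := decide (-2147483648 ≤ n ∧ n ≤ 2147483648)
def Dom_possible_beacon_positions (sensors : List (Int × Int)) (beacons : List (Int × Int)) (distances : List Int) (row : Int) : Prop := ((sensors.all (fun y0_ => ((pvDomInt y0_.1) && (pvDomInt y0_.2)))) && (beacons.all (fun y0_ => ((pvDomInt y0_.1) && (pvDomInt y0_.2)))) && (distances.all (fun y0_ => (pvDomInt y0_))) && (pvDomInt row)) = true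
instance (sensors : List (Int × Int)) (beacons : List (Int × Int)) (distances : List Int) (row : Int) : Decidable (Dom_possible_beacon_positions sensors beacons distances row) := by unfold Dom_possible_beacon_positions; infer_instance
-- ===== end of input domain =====

-- B replaces the inline running-max gap emission by merge-intervals-then-emit-gaps (alternative decomposition, same cost).

-- ===== PORT A =====
def delta_row (sensor : Int × Int) (distance : Int) (row : Int) : Int :=
  distance - |sensor.2 - row|

def possible_beacon_positions (sensors : List (Int × Int)) (beacons : List (Int × Int)) (distances : List Int) (row : Int) : List (Int × Int) :=
  let ranges : List (Int × Int) :=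
    (List.zip sensors distances).foldl (fun acc sd =>
      let d_row := delta_row sd.1 sd.2 row
      if d_row > 0 then acc ++ [(sd.1.1 - d_row, sd.1.1 + d_row)] else acc) []
  let ranges := PySem.List.sorted ranges (fun r => r.1) false
  match PySem.List.pyGet? ranges 0 with
  | none => []  -- Python raises IndexError at ranges[0][1]; excluded by Pre_
  | some r0 =>
    (((PySem.List.pyRange 0 ((ranges.length : Int) - 1) 1).foldl
      (fun (st : Int × List (Int × Int)) i =>
        let max_col_prev := (PySem.List.pyGetD ranges i (0, 0)).2
        let min_col_next := (PySem.List.pyGetD ranges (i + 1) (0, 0)).1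
        let max_col := if max_col_prev > st.1 then max_col_prev else st.1
        if max_col < min_col_next then
          (max_col, st.2 ++ (PySem.List.pyRange (max_col + 1) min_col_next 1).map (fun c => (c, row)))
        else (max_col, st.2))
      (r0.2, [])).2)

-- ===== PORT B =====
def pvMergeStep (st : List (Int × Int) × Int × Int) (r : Int × Int) : List (Int × Int) × Int × Int :=
  if r.1 ≤ st.2.2 then
    (st.1, st.2.1, if r.2 > st.2.2 then r.2 else st.2.2)
  else
    (st.1 ++ [(st.2.1, st.2.2)], r.1, r.2)

def possible_beacon_positions_alt (sensors : List (Int × Int)) (beacons : List (Int × Int)) (distances : List Int) (row : Int) : List (Int × Int) :=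
  let ranges : List (Int × Int) :=
    (List.zip sensors distances).foldl (fun acc sd =>
      let d := sd.2 - |sd.1.2 - row|
      if d > 0 then acc ++ [(sd.1.1 - d, sd.1.1 + d)] else acc) []
  let ranges := PySem.List.sorted ranges (fun r => r.1) false
  match ranges with
  | [] => []  -- Python raises IndexError at ranges[0]; excluded by Pre_
  | r0 :: rest =>
    let st := rest.foldl pvMergeStep ([], r0.1, r0.2)
    let merged := st.1 ++ [(st.2.1, st.2.2)]
    (List.zip merged merged.tail).flatMap
      (fun pr => (PySem.List.pyRange (pr.1.2 + 1) pr.2.1 1).map (fun c => (c, row)))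

-- ===== PRECONDITION & SPEC =====
-- Pre_ excludes exactly the inputs on which A raises IndexError (no sensor covers any cell of the row,
-- so the `ranges` list is empty and `ranges[0]` fails); B raises the same IndexError there.
def Pre_possible_beacon_positions (sensors : List (Int × Int)) (beacons : List (Int × Int)) (distances : List Int) (row : Int) : Prop :=
  ∃ sd ∈ List.zip sensors distances, sd.2 - |sd.1.2 - row| > 0

instance (sensors : List (Int × Int)) (beacons : List (Int × Int)) (distances : List Int) (row : Int) : Decidable (Pre_possible_beacon_positions sensors beacons distances row) := by unfold Pre_possible_beacon_positions; infer_instance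

def pvWitness_possible_beacon_positions : (List (Int × Int)) × (List (Int × Int)) × List Int × Int :=
  ([(0, 0)], [], [1], 0)

def Spec_possible_beacon_positions (sensors : List (Int × Int)) (beacons : List (Int × Int)) (distances : List Int) (row : Int) (out : List (Int × Int)) : Prop := out = possible_beacon_positions_alt sensors beacons distances row
instance (sensors : List (Int × Int)) (beacons : List (Int × Int)) (distances : List Int) (row : Int) (out : List (Int × Int)) : Decidable (Spec_possible_beacon_positions sensors beacons distances row out) := by unfold Spec_possible_beacon_positions; infer_instance

-- ===== CLAIM (what is proved, stated in full; the proofs are below) =====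
def Claim_equal_possible_beacon_positions : Prop := ∀ (sensors : List (Int × Int)) (beacons : List (Int × Int)) (distances : List Int) (row : Int), Dom_possible_beacon_positions sensors beacons distances row → Pre_possible_beacon_positions sensors beacons distances row → Spec_possible_beacon_positions sensors beacons distances row (possible_beacon_positions sensors beacons distances row)

-- ===== LEMMAS AND PROOFS =====

/-- gap cells between column m (exclusive) and column s (exclusive), paired with the row. -/
def gapL (row m s : Int) : List (Int × Int) :=
  (PySem.List.pyRange (m + 1) s 1).map (fun c => (c, row))

/-- A's scan, abstracted: running max of right ends, emitting gaps before each next start. -/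
def aScan (row m : Int) : List (Int × Int) → List (Int × Int)
  | [] => []
  | r :: t => (if m < r.1 then gapL row m r.1 else []) ++ aScan row (max m r.2) t

/-- B's merge of sorted ranges into disjoint intervals. -/
def bMerge (cs ce : Int) : List (Int × Int) → List (Int × Int)
  | [] => [(cs, ce)]
  | r :: t => if r.1 ≤ ce then bMerge cs (max ce r.2) t else (cs, ce) :: bMerge r.1 r.2 t

/-- B's gap emission between consecutive intervals. -/
def gapsOf (row : Int) (l : List (Int × Int)) : List (Int × Int) :=
  (List.zip l l.tail).flatMap (fun pr => gapL row pr.1.2 pr.2.1)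

theorem foldl_pvMergeStep (t : List (Int × Int)) :
    ∀ (acc : List (Int × Int)) (cs ce : Int),
      (((t.foldl pvMergeStep (acc, cs, ce)).1) ++ [((t.foldl pvMergeStep (acc, cs, ce)).2.1, (t.foldl pvMergeStep (acc, cs, ce)).2.2)])
        = acc ++ bMerge cs ce t := by
  induction t with
  | nil => intro acc cs ce; simp [bMerge]
  | cons r t ih =>
    intro acc cs ce
    simp only [List.foldl_cons, pvMergeStep, bMerge]
    by_cases h : r.1 ≤ ce
    · simp only [if_pos h]
      have : (if r.2 > ce then r.2 else ce) = max ce r.2 := by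
        simp only [max_def]; split_ifs <;> omega
      rw [this, ih]
    · simp only [if_neg h, ih, List.append_assoc, List.singleton_append]

theorem bMerge_head (t : List (Int × Int)) :
    ∀ (cs ce : Int), ∃ e tl, bMerge cs ce t = (cs, e) :: tl := by
  induction t with
  | nil => intro cs ce; exact ⟨ce, [], rfl⟩
  | cons r t ih =>
    intro cs ce
    by_cases h : r.1 ≤ ce
    · obtain ⟨e, tl, he⟩ := ih cs (max ce r.2)
      exact ⟨e, tl, by simp [bMerge, h, he]⟩
    · exact ⟨ce, bMerge r.1 r.2 t, by simp [bMerge, h]⟩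

theorem gapsOf_cons_cons (row : Int) (a c : Int × Int) (r : List (Int × Int)) :
    gapsOf row (a :: c :: r) = gapL row a.2 c.1 ++ gapsOf row (c :: r) := by
  simp [gapsOf]

theorem gapsOf_bMerge (row : Int) (t : List (Int × Int)) :
    ∀ (cs ce : Int), (∀ p ∈ t, p.1 ≤ p.2) →
      gapsOf row (bMerge cs ce t) = aScan row ce t := by
  induction t with
  | nil => intro cs ce _; simp [bMerge, gapsOf, aScan]
  | cons r t ih =>
    intro cs ce h
    have hr : r.1 ≤ r.2 := h r (List.mem_cons_self)
    have ht : ∀ p ∈ t, p.1 ≤ p.2 := fun p hp => h p (List.mem_cons_of_mem _ hp)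
    by_cases hle : r.1 ≤ ce
    · have : ¬ ce < r.1 := by omega
      simp only [bMerge, if_pos hle, aScan, this]
      exact ih cs (max ce r.2) ht
    · have hlt : ce < r.1 := by omega
      have hmax : max ce r.2 = r.2 := by omega
      obtain ⟨e, tl, he⟩ := bMerge_head t r.1 r.2
      simp only [bMerge, if_neg hle, he, gapsOf_cons_cons, aScan, if_pos hlt, hmax]
      rw [← he, ih r.1 r.2 ht]

theorem range_map_pairs {α : Type} (d : α) (rs : List α) :
    (List.range (rs.length - 1)).map (fun i => (rs.getD i d, rs.getD (i + 1) d))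
      = List.zip rs rs.tail := by
  induction rs with
  | nil => simp
  | cons a rs ih =>
    cases rs with
    | nil => simp
    | cons b t =>
      have : (a :: b :: t).length - 1 = ((b :: t).length - 1) + 1 := by
        simp
      rw [this, List.range_succ_eq_map]
      simp only [List.map_cons, List.map_map]
      have hmap : ((List.range ((b :: t).length - 1)).map
          ((fun i => ((a :: b :: t).getD i d, (a :: b :: t).getD (i + 1) d)) ∘ (· + 1)))
          = (List.range ((b :: t).length - 1)).map
            (fun i => ((b :: t).getD i d, (b :: t).getD (i + 1) d)) := by
        apply List.map_congr_left
        intro i _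
        simp [List.getD]
      rw [hmap, ih]
      simp [List.zip]

/-- A's pair-scan step (what A's indexed loop body computes on the pair (ranges[i], ranges[i+1])). -/
def aStep (row : Int) (st : Int × List (Int × Int)) (pr : (Int × Int) × (Int × Int)) : Int × List (Int × Int) :=
  let max_col := if pr.1.2 > st.1 then pr.1.2 else st.1
  if max_col < pr.2.1 then (max_col, st.2 ++ gapL row max_col pr.2.1)
  else (max_col, st.2)

theorem foldl_aStep (row : Int) (t : List (Int × Int)) :
    ∀ (p : Int × Int) (m : Int) (acc : List (Int × Int)),
      ((List.zip (p :: t) t).foldl (aStep row) (m, acc)).2 = acc ++ aScan row (max m p.2) t := by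
  induction t with
  | nil => intro p m acc; simp [aScan]
  | cons q t ih =>
    intro p m acc
    have hz : List.zip (p :: q :: t) (q :: t) = (p, q) :: List.zip (q :: t) t := by
      simp [List.zip]
    rw [hz, List.foldl_cons]
    have hm : (if p.2 > m then p.2 else m) = max m p.2 := by
      simp only [max_def]; split_ifs <;> omega
    by_cases h : max m p.2 < q.1
    · have : aStep row (m, acc) (p, q) = (max m p.2, acc ++ gapL row (max m p.2) q.1) := by
        simp [aStep, hm, h]
      rw [this, ih]
      simp [aScan, h, List.append_assoc]
    · have : aStep row (m, acc) (p, q) = (max m p.2, acc) := by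
        simp [aStep, hm, h]
      rw [this, ih]
      simp [aScan, h]

theorem ranges_build_le (row : Int) (l : List ((Int × Int) × Int)) :
    ∀ (acc : List (Int × Int)), (∀ p ∈ acc, p.1 ≤ p.2) →
      ∀ p ∈ l.foldl (fun acc sd =>
          let d_row := delta_row sd.1 sd.2 row
          if d_row > 0 then acc ++ [(sd.1.1 - d_row, sd.1.1 + d_row)] else acc) acc,
        p.1 ≤ p.2 := by
  induction l with
  | nil => intro acc h; simpa using h
  | cons sd l ih =>
    intro acc h
    simp only [List.foldl_cons]
    apply ih
    by_cases hd : delta_row sd.1 sd.2 row > 0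
    · simp only [if_pos hd]
      intro p hp
      rcases List.mem_append.1 hp with h1 | h1
      · exact h p h1
      · simp at h1; subst h1; simp; omega
    · simpa [if_neg hd] using h

theorem ranges_build_ne_nil (row : Int) (l : List ((Int × Int) × Int)) :
    ∀ (acc : List (Int × Int)),
      (acc ≠ [] ∨ ∃ sd ∈ l, sd.2 - |sd.1.2 - row| > 0) →
      l.foldl (fun acc sd =>
          let d_row := delta_row sd.1 sd.2 row
          if d_row > 0 then acc ++ [(sd.1.1 - d_row, sd.1.1 + d_row)] else acc) acc ≠ [] := by
  induction l with
  | nil =>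
    intro acc h
    rcases h with h | h
    · simpa using h
    · simp at h
  | cons sd l ih =>
    intro acc h
    simp only [List.foldl_cons]
    apply ih
    by_cases hd : delta_row sd.1 sd.2 row > 0
    · left; simp [if_pos hd]
    · rcases h with h | h
      · left; simpa [if_neg hd] using h
      · rcases h with ⟨sd', hsd', hpos⟩
        rcases List.mem_cons.1 hsd' with h1 | h1
        · exfalso; subst h1; simp [delta_row] at hd; omega
        · right; exact ⟨sd', h1, hpos⟩

/-- Core: on the same nonempty list of well-formed sorted ranges, A's scan equals B's merge-then-gaps. -/
theorem core_eq (row : Int) (r0 : Int × Int) (rest : List (Int × Int))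
    (hle : ∀ p ∈ rest, p.1 ≤ p.2) :
    (((PySem.List.pyRange 0 (((r0 :: rest).length : Int) - 1) 1).foldl
      (fun (st : Int × List (Int × Int)) i =>
        let max_col_prev := (PySem.List.pyGetD (r0 :: rest) i (0, 0)).2
        let min_col_next := (PySem.List.pyGetD (r0 :: rest) (i + 1) (0, 0)).1
        let max_col := if max_col_prev > st.1 then max_col_prev else st.1
        if max_col < min_col_next then
          (max_col, st.2 ++ (PySem.List.pyRange (max_col + 1) min_col_next 1).map (fun c => (c, row)))
        else (max_col, st.2))
      (r0.2, [])).2)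
    = gapsOf row ((rest.foldl pvMergeStep ([], r0.1, r0.2)).1
        ++ [((rest.foldl pvMergeStep ([], r0.1, r0.2)).2.1, (rest.foldl pvMergeStep ([], r0.1, r0.2)).2.2)]) := by
  set rs : List (Int × Int) := r0 :: rest with hrs
  have hrange : PySem.List.pyRange 0 ((rs.length : Int) - 1) 1
      = (List.range (rs.length - 1)).map (fun k : Nat => (k : Int)) := by
    rw [PySem.List.pyRange_one]
    have : (((rs.length : Int) - 1) - 0).toNat = rs.length - 1 := by omega
    rw [this]
    apply List.map_congr_left
    intro k _
    simp
  rw [hrange, List.foldl_map]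
  have hfold :
      (List.foldl (fun (x : Int × List (Int × Int)) (y : Nat) =>
          let max_col_prev := (PySem.List.pyGetD rs (y : Int) (0, 0)).2
          let min_col_next := (PySem.List.pyGetD rs ((y : Int) + 1) (0, 0)).1
          let max_col := if max_col_prev > x.1 then max_col_prev else x.1
          if max_col < min_col_next then
            (max_col, x.2 ++ (PySem.List.pyRange (max_col + 1) min_col_next 1).map (fun c => (c, row)))
          else (max_col, x.2)) (r0.2, ([] : List (Int × Int))) (List.range (rs.length - 1)))
      = List.foldl (fun st (k : Nat) => aStep row st (rs.getD k (0, 0), rs.getD (k + 1) (0, 0)))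
          (r0.2, []) (List.range (rs.length - 1)) := by
    apply List.foldl_ext
    intro st k _
    have h1 : PySem.List.pyGetD rs (k : Int) (0, 0) = rs.getD k (0, 0) :=
      PySem.List.pyGetD_natCast ..
    have h2 : PySem.List.pyGetD rs ((k : Int) + 1) (0, 0) = rs.getD (k + 1) (0, 0) := by
      have h3 : ((k : Int) + 1) = ((k + 1 : Nat) : Int) := by push_cast; ring
      rw [h3, PySem.List.pyGetD_natCast]
    simp only [h1, h2, aStep, gapL]
  rw [hfold]
  have hmapf : List.foldl (fun st (k : Nat) => aStep row st (rs.getD k (0, 0), rs.getD (k + 1) (0, 0)))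
      (r0.2, ([] : List (Int × Int))) (List.range (rs.length - 1))
      = List.foldl (aStep row) (r0.2, [])
          ((List.range (rs.length - 1)).map (fun i => (rs.getD i (0, 0), rs.getD (i + 1) (0, 0)))) := by
    rw [List.foldl_map]
  rw [hmapf, range_map_pairs (0, 0) rs]
  have hz : rs.tail = rest := rfl
  rw [hz, hrs]
  rw [foldl_aStep row rest r0 r0.2 [], foldl_pvMergeStep rest [] r0.1 r0.2]
  simp only [List.nil_append]
  rw [gapsOf_bMerge row rest r0.1 r0.2 hle, max_self]

-- ===== VERDICT (by name: the statement is the Claim_ definition above) =====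
theorem possible_beacon_positions_spec : Claim_equal_possible_beacon_positions := by
  intro sensors beacons distances row _ hPre
  unfold Spec_possible_beacon_positions
  unfold possible_beacon_positions possible_beacon_positions_alt
  simp only []
  set built : List (Int × Int) :=
    (List.zip sensors distances).foldl (fun acc sd =>
      let d_row := delta_row sd.1 sd.2 row
      if d_row > 0 then acc ++ [(sd.1.1 - d_row, sd.1.1 + d_row)] else acc) [] with hbuilt
  have hbuiltB : (List.zip sensors distances).foldl (fun acc sd =>
      let d := sd.2 - |sd.1.2 - row|
      if d > 0 then acc ++ [(sd.1.1 - d, sd.1.1 + d)] else acc) [] = built := by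
    rw [hbuilt]; rfl
  rw [hbuiltB]
  set rs := PySem.List.sorted built (fun r => r.1) false with hrs
  have hne : rs ≠ [] := by
    rw [hrs, Ne, PySem.List.sorted_eq_nil_iff]
    exact ranges_build_ne_nil row (List.zip sensors distances) [] (Or.inr hPre)
  have hle : ∀ p ∈ rs, p.1 ≤ p.2 := by
    intro p hp
    rw [hrs, PySem.List.mem_sorted] at hp
    exact ranges_build_le row (List.zip sensors distances) [] (by simp) p hp
  obtain ⟨r0, rest, hcons⟩ := List.exists_cons_of_ne_nil hne
  rw [hcons]
  rw [PySem.List.pyGet?_zero_cons]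
  have hle' : ∀ p ∈ rest, p.1 ≤ p.2 := by
    intro p hp; exact hle p (hcons ▸ List.mem_cons_of_mem _ hp)
  exact core_eq row r0 rest hle'
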